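-- pv_equiv track=rewrite | github.com/parreira/python-startup-project | o_meu_projecto.py | inverter_direccoes
-- ===== SOURCE A (Python) =====
-- def inverter_direccoes(lista):
--     inv=[]
--     for i in range(len(lista)):
--         if este_p(lista[i]):
--             inv=inv+['oeste']
--         elif oeste_p(lista[i]):
--             inv=inv+['este']
--         elif sul_p(lista[i]):
--             inv=inv+['norte']
--         elif norte_p(lista[i]):
--             inv=inv+['sul']
--     novo=[]
--     for i in range(len(inv)-1,-1,-1):
--         novo=novo+[inv[i]]
--     return novo
--
-- norte='norte'
--
-- sul='sul'
--
-- oeste='oeste'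
--
-- este='este'
--
-- def norte_p(direccao):
--     return direccao == norte
--
-- def sul_p(direccao):
--     return direccao == sul
--
-- def oeste_p(direccao):
--     return direccao == oeste
--
-- def este_p(direccao):
--     return direccao == este
-- ===== SOURCE B (Python) =====
-- OPP = {'este': 'oeste', 'oeste': 'este', 'sul': 'norte', 'norte': 'sul'}
--
-- def inverter_direccoes(lista):
--     # Single forward pass: prepending each opposite builds the reversed
--     # result directly, so no second (reversal) pass is needed.
--     inv = []
--     for d in lista:
--         o = OPP.get(d)
--         if o is not None:
--             inv.insert(0, o)
--     return inv
-- ===== Notes on version B (the rewrite author's own statement) =====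
-- stated objective: faster
-- what changed: A stages the work as a forward filter/map pass (built with quadratic inv+[x] concatenation) followed by a separate index-driven reversal pass; B fuses everything into one forward loop that prepends each dict-looked-up opposite at the front, so the reversed order emerges from the insertion order and no reversal pass exists.
import Mathlib
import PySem

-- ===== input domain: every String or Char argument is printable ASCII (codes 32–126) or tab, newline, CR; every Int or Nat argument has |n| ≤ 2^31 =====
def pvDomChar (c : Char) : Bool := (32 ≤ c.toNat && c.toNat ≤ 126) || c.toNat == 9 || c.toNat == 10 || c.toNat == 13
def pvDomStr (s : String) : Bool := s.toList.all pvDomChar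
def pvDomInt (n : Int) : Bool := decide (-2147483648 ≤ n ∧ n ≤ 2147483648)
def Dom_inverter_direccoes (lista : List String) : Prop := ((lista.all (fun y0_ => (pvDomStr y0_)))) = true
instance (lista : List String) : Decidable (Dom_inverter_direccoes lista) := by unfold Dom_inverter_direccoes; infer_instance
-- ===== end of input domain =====

-- B replaces A's two staged passes (forward filter/map via quadratic inv+[x], then an
-- index-driven reversal loop) with ONE forward pass that prepends each dict-looked-up
-- opposite at the front, so the reversed order emerges from insertion and no reversal pass exists.

-- ===== PORT A =====
def norte_p (direccao : String) : Bool := direccao == "norte"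
def sul_p (direccao : String) : Bool := direccao == "sul"
def oeste_p (direccao : String) : Bool := direccao == "oeste"
def este_p (direccao : String) : Bool := direccao == "este"

def inverter_direccoes (lista : List String) : List String :=
  let inv := (PySem.List.pyRange 0 lista.length 1).foldl (fun inv i =>
    let x := PySem.List.pyGetD lista i ""
    if este_p x then inv ++ ["oeste"]
    else if oeste_p x then inv ++ ["este"]
    else if sul_p x then inv ++ ["norte"]
    else if norte_p x then inv ++ ["sul"]
    else inv) []
  (PySem.List.pyRange ((inv.length : Int) - 1) (-1) (-1)).foldl
    (fun novo i => novo ++ [PySem.List.pyGetD inv i ""]) []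

-- ===== PORT B =====
def OPP : PySem.Dict String String :=
  PySem.Dict.ofList [("este", "oeste"), ("oeste", "este"), ("sul", "norte"), ("norte", "sul")]

-- one forward loop; `inv.insert(0, o)` is `o :: inv`
def inverter_direccoes_alt (lista : List String) : List String :=
  lista.foldl (fun inv d =>
    match OPP.get? d with
    | some o => o :: inv
    | none => inv) []

-- ===== PRECONDITION & SPEC =====
def Spec_inverter_direccoes (lista : List String) (out : List String) : Prop := out = inverter_direccoes_alt lista
instance (lista : List String) (out : List String) : Decidable (Spec_inverter_direccoes lista out) := by unfold Spec_inverter_direccoes; infer_instance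

-- ===== CLAIM (what is proved, stated in full; the proofs are below) =====
def Claim_equal_inverter_direccoes : Prop := ∀ (lista : List String), Dom_inverter_direccoes lista → Spec_inverter_direccoes lista (inverter_direccoes lista)

-- ===== LEMMAS AND PROOFS =====

-- A's step function, as the partial map both sides compute
def aMap (x : String) : Option String :=
  if este_p x then some "oeste"
  else if oeste_p x then some "este"
  else if sul_p x then some "norte"
  else if norte_p x then some "sul"
  else none

theorem aMap_eq_get? (x : String) : aMap x = OPP.get? x := by
  by_cases h1 : x = "este"
  · subst h1; decide
  by_cases h2 : x = "oeste"
  · subst h2; decide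
  by_cases h3 : x = "sul"
  · subst h3; decide
  by_cases h4 : x = "norte"
  · subst h4; decide
  unfold aMap OPP este_p oeste_p sul_p norte_p
  simp_all [PySem.Dict.ofList, PySem.Dict.get?, PySem.Dict.insert, PySem.Dict.empty,
    PySem.Dict.contains, PySem.Dict.update]
  exact ⟨fun h => h1 h.symm, fun h => h2 h.symm, fun h => h3 h.symm, fun h => h4 h.symm⟩

theorem loop1_foldl (lista acc : List String) :
    lista.foldl (fun inv x =>
      if este_p x then inv ++ ["oeste"]
      else if oeste_p x then inv ++ ["este"]
      else if sul_p x then inv ++ ["norte"]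
      else if norte_p x then inv ++ ["sul"]
      else inv) acc = acc ++ lista.filterMap aMap := by
  induction lista generalizing acc with
  | nil => simp
  | cons h t ih =>
    simp only [List.foldl_cons, List.filterMap_cons, ih, aMap]
    split_ifs <;> simp

theorem loop2_rev (inv : List String) :
    (PySem.List.pyRange ((inv.length : Int) - 1) (-1) (-1)).foldl
      (fun novo i => novo ++ [PySem.List.pyGetD inv i ""]) [] = inv.reverse := by
  rw [PySem.List.pyRange_neg_one_eq_reverse]
  have h2 : (inv.length : Int) - 1 + 1 = (inv.length : Int) := by ring
  rw [show ((-1 : Int) + 1) = 0 by norm_num, h2,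
    PySem.List.foldl_append_singleton_eq_map, List.map_reverse,
    PySem.List.map_pyGetD_pyRange_zero' inv ""]
  simp

-- B's loop: prepending builds the reverse of the forward filterMap
theorem alt_foldl (lista acc : List String) :
    lista.foldl (fun inv d =>
      match OPP.get? d with
      | some o => o :: inv
      | none => inv) acc = (lista.filterMap (fun d => OPP.get? d)).reverse ++ acc := by
  induction lista generalizing acc with
  | nil => simp
  | cons h t ih =>
    simp only [List.foldl_cons, List.filterMap_cons]
    cases hg : OPP.get? h <;> simp [ih]

-- ===== VERDICT (by name: the statement is the Claim_ definition above) =====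
theorem inverter_direccoes_spec : Claim_equal_inverter_direccoes := by
  intro lista _
  unfold Spec_inverter_direccoes inverter_direccoes inverter_direccoes_alt
  have h1 : (PySem.List.pyRange 0 ((lista.length : Int)) 1).foldl
      (fun inv i =>
        let x := PySem.List.pyGetD lista i ""
        if este_p x then inv ++ ["oeste"]
        else if oeste_p x then inv ++ ["este"]
        else if sul_p x then inv ++ ["norte"]
        else if norte_p x then inv ++ ["sul"]
        else inv) [] = lista.filterMap aMap := by
    show (PySem.List.pyRange 0 ((lista.length : Int)) 1).foldl
      (fun inv i => (fun inv x =>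
        if este_p x then inv ++ ["oeste"]
        else if oeste_p x then inv ++ ["este"]
        else if sul_p x then inv ++ ["norte"]
        else if norte_p x then inv ++ ["sul"]
        else inv) inv (PySem.List.pyGetD lista i "")) [] = lista.filterMap aMap
    rw [PySem.List.foldl_pyRange_zero_pyGetD' lista "" (fun inv x =>
        if este_p x then inv ++ ["oeste"]
        else if oeste_p x then inv ++ ["este"]
        else if sul_p x then inv ++ ["norte"]
        else if norte_p x then inv ++ ["sul"]
        else inv) []]
    simpa using loop1_foldl lista []
  rw [h1, loop2_rev, alt_foldl]
  simp [List.filterMap_congr (fun x _ => aMap_eq_get? x)]
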